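-- pv_equiv track=rewrite | github.com/CvanderStoep/adventofcode2020 | day16.py | check_valid_tickets_two
-- ===== SOURCE A (Python) =====
-- def check_valid_tickets_two(valid_ranges: list, nearby_tickets: list) -> list:
--     valid_tickets = []
--     for ticket in nearby_tickets:
--         valid = True
--         for t in ticket:
--             valid_t = False
--             for b, e in valid_ranges:
--                 if b <= t <= e:
--                     valid_t = True
--                     break
--             if not valid_t:
--                 valid = False
--                 break
--         if valid:
--             valid_tickets.append(ticket)
--
--     return valid_tickets
-- ===== SOURCE B (Python) =====
-- def check_valid_tickets_two(valid_ranges: list, nearby_tickets: list) -> list: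
--     # Merge the ranges (sorted by start) into disjoint intervals once, then
--     # test each ticket value with a single ordered scan that stops early.
--     merged = []
--     for b, e in sorted(valid_ranges, key=lambda r: r[0]):
--         if merged and b <= merged[-1][1]:
--             lb, le = merged[-1]
--             merged[-1] = (lb, max(le, e))
--         else:
--             merged.append((b, e))
--
--     def contains(t):
--         for b, e in merged:
--             if t < b:
--                 return False
--             if t <= e:
--                 return True
--         return False
--
--     return [ticket for ticket in nearby_tickets if all(contains(t) for t in ticket)]
-- ===== Notes on version B (the rewrite author's own statement) =====
-- stated objective: alternative
-- what changed: B sorts the ranges by start and merges them once into disjoint intervals, then tests each ticket value with a single early-exit ordered scan of the merged intervals, instead of A's per-value scan over all original ranges.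
import Mathlib
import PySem

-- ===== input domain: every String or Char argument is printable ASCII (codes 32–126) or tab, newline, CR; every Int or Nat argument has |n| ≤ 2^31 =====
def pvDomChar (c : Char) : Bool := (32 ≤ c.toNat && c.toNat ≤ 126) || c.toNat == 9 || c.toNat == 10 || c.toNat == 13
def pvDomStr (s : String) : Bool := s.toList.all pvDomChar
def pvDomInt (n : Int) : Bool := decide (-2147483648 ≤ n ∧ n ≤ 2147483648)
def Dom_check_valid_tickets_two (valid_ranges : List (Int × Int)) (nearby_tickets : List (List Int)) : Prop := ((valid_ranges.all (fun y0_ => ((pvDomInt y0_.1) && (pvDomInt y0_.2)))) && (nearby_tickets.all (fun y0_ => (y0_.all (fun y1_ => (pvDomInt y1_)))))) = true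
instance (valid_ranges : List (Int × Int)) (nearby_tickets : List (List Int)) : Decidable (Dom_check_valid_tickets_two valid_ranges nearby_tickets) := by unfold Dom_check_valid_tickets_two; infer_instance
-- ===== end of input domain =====

-- B merges the ranges (sorted by start) into disjoint intervals once and tests each
-- value with an early-exit ordered scan, replacing A's per-value scan of all ranges.

-- ===== PORT A =====
-- inner `for b, e in valid_ranges` loop with break
def aCover (valid_ranges : List (Int × Int)) (t : Int) : Bool :=
  match valid_ranges with
  | [] => false
  | (b, e) :: rest => if b ≤ t ∧ t ≤ e then true else aCover rest t

-- middle `for t in ticket` loop with break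
def aTicket (valid_ranges : List (Int × Int)) (ticket : List Int) : Bool :=
  match ticket with
  | [] => true
  | t :: ts => if aCover valid_ranges t then aTicket valid_ranges ts else false

-- outer loop appending valid tickets
def aLoop (valid_ranges : List (Int × Int)) (nearby_tickets : List (List Int)) : List (List Int) :=
  match nearby_tickets with
  | [] => []
  | tk :: rest => if aTicket valid_ranges tk then tk :: aLoop valid_ranges rest else aLoop valid_ranges rest

def check_valid_tickets_two (valid_ranges : List (Int × Int)) (nearby_tickets : List (List Int)) : List (List Int) :=
  aLoop valid_ranges nearby_tickets

-- ===== PORT B =====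
-- body of B's merging loop; the accumulator is kept reversed (head = Python's merged[-1])
def mergeStep (acc : List (Int × Int)) (r : Int × Int) : List (Int × Int) :=
  match acc with
  | [] => [r]
  | (lb, le) :: tl => if r.1 ≤ le then (lb, max le r.2) :: tl else r :: (lb, le) :: tl

-- B's `contains`: ordered scan with early exit
def bContains (merged : List (Int × Int)) (t : Int) : Bool :=
  match merged with
  | [] => false
  | (b, e) :: rest => if t < b then false else if t ≤ e then true else bContains rest t

def check_valid_tickets_two_alt (valid_ranges : List (Int × Int)) (nearby_tickets : List (List Int)) : List (List Int) :=
  let merged := ((PySem.List.sorted valid_ranges (fun r => r.1) false).foldl mergeStep []).reverse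
  nearby_tickets.filter (fun tk => tk.all (fun t => bContains merged t))

-- ===== PRECONDITION & SPEC =====
def Spec_check_valid_tickets_two (valid_ranges : List (Int × Int)) (nearby_tickets : List (List Int)) (out : List (List Int)) : Prop := out = check_valid_tickets_two_alt valid_ranges nearby_tickets
instance (valid_ranges : List (Int × Int)) (nearby_tickets : List (List Int)) (out : List (List Int)) : Decidable (Spec_check_valid_tickets_two valid_ranges nearby_tickets out) := by unfold Spec_check_valid_tickets_two; infer_instance

-- ===== CLAIM (what is proved, stated in full; the proofs are below) =====
def Claim_equal_check_valid_tickets_two : Prop := ∀ (valid_ranges : List (Int × Int)) (nearby_tickets : List (List Int)), Dom_check_valid_tickets_two valid_ranges nearby_tickets → Spec_check_valid_tickets_two valid_ranges nearby_tickets (check_valid_tickets_two valid_ranges nearby_tickets)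

-- ===== LEMMAS AND PROOFS =====

-- coverage: some interval of l contains t
def Cov (l : List (Int × Int)) (t : Int) : Prop := ∃ r ∈ l, r.1 ≤ t ∧ t ≤ r.2

theorem aCover_iff (l : List (Int × Int)) (t : Int) : aCover l t = true ↔ Cov l t := by
  induction l with
  | nil => simp [aCover, Cov]
  | cons r rest ih =>
      obtain ⟨b, e⟩ := r
      by_cases h : b ≤ t ∧ t ≤ e
      · simp only [aCover, if_pos h, Cov, List.mem_cons]
        exact ⟨fun _ => ⟨(b, e), Or.inl rfl, h⟩, fun _ => trivial⟩
      · simp only [aCover, if_neg h]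
        rw [ih]
        simp only [Cov, List.mem_cons]
        constructor
        · rintro ⟨x, hx, hc⟩; exact ⟨x, Or.inr hx, hc⟩
        · rintro ⟨x, hx | hx, hc⟩
          · subst hx; exact absurd hc h
          · exact ⟨x, hx, hc⟩

theorem aTicket_eq_all (vr : List (Int × Int)) (tk : List Int) :
    aTicket vr tk = tk.all (fun t => aCover vr t) := by
  induction tk with
  | nil => simp [aTicket]
  | cons t ts ih => by_cases h : aCover vr t = true <;> simp [aTicket, h, ih]

theorem aLoop_eq_filter (vr : List (Int × Int)) (nts : List (List Int)) :
    aLoop vr nts = nts.filter (fun tk => aTicket vr tk) := by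
  induction nts with
  | nil => rfl
  | cons tk rest ih =>
      by_cases h : aTicket vr tk = true <;> simp [aLoop, h, ih]

-- one merging step: keeps the reversed accumulator start-antitone, keeps its starts
-- below all remaining starts, and adds exactly the incoming interval's coverage
theorem mergeStep_spec (acc : List (Int × Int)) (r : Int × Int) (rest : List (Int × Int))
    (hrrest : ∀ r' ∈ rest, r.1 ≤ r'.1)
    (h1 : ∀ x ∈ acc, ∀ r' ∈ r :: rest, x.1 ≤ r'.1)
    (h2 : acc.Pairwise (fun a b => b.1 ≤ a.1)) :
    (mergeStep acc r).Pairwise (fun a b => b.1 ≤ a.1) ∧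
    (∀ x ∈ mergeStep acc r, ∀ r' ∈ rest, x.1 ≤ r'.1) ∧
    ∀ t, (Cov (mergeStep acc r) t ↔ Cov acc t ∨ (r.1 ≤ t ∧ t ≤ r.2)) := by
  cases acc with
  | nil =>
      refine ⟨by simp [mergeStep], ?_, ?_⟩
      · intro x hx r' hr'
        simp only [mergeStep, List.mem_singleton] at hx
        subst hx; exact hrrest r' hr'
      · intro t; simp [mergeStep, Cov]
  | cons hd tl =>
      obtain ⟨lb, le⟩ := hd
      have hlb : lb ≤ r.1 := h1 (lb, le) (by simp) r (by simp)
      by_cases hc : r.1 ≤ le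
      · refine ⟨?_, ?_, ?_⟩
        · simp only [mergeStep, if_pos hc]
          rw [List.pairwise_cons] at h2 ⊢
          exact ⟨fun x hx => h2.1 x hx, h2.2⟩
        · intro x hx r' hr'
          simp only [mergeStep, if_pos hc, List.mem_cons] at hx
          rcases hx with hx | hx
          · subst hx; exact h1 (lb, le) (by simp) r' (List.mem_cons_of_mem _ hr')
          · exact h1 x (List.mem_cons_of_mem _ hx) r' (List.mem_cons_of_mem _ hr')
        · intro t
          simp only [mergeStep, if_pos hc, Cov, List.mem_cons]
          constructor
          · rintro ⟨x, hx | hx, hcov⟩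
            · subst hx
              simp only at hcov
              rcases (by omega : t ≤ le ∨ le < t) with hle | hle
              · exact Or.inl ⟨(lb, le), Or.inl rfl, hcov.1, hle⟩
              · have := hcov.2
                refine Or.inr ⟨by omega, by omega⟩
            · exact Or.inl ⟨x, Or.inr hx, hcov⟩
          · rintro (⟨x, hx | hx, hcov⟩ | hcov)
            · subst hx
              exact ⟨(lb, max le r.2), Or.inl rfl, hcov.1, le_trans hcov.2 (le_max_left _ _)⟩
            · exact ⟨x, Or.inr hx, hcov⟩
            · exact ⟨(lb, max le r.2), Or.inl rfl, by omega, le_trans hcov.2 (le_max_right _ _)⟩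
      · refine ⟨?_, ?_, ?_⟩
        · simp only [mergeStep, if_neg hc]
          rw [List.pairwise_cons]
          exact ⟨fun x hx => h1 x hx r (by simp), h2⟩
        · intro x hx r' hr'
          simp only [mergeStep, if_neg hc, List.mem_cons] at hx
          rcases hx with hx | hx
          · subst hx; exact hrrest r' hr'
          · exact h1 x (by simpa using hx) r' (List.mem_cons_of_mem _ hr')
        · intro t
          simp only [mergeStep, if_neg hc, Cov, List.mem_cons]
          constructor
          · rintro ⟨x, hx | hx, hcov⟩
            · subst hx; exact Or.inr hcov
            · exact Or.inl ⟨x, hx, hcov⟩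
          · rintro (⟨x, hx, hcov⟩ | hcov)
            · exact ⟨x, Or.inr hx, hcov⟩
            · exact ⟨r, Or.inl rfl, hcov⟩

-- the merging fold: preserves start-antitonicity of the (reversed) accumulator and exact coverage
theorem merge_fold (s : List (Int × Int)) :
    ∀ acc : List (Int × Int),
      s.Pairwise (fun r r' => r.1 ≤ r'.1) →
      (∀ x ∈ acc, ∀ r' ∈ s, x.1 ≤ r'.1) →
      acc.Pairwise (fun a b => b.1 ≤ a.1) →
      (s.foldl mergeStep acc).Pairwise (fun a b => b.1 ≤ a.1) ∧
      ∀ t, (Cov (s.foldl mergeStep acc) t ↔ Cov acc t ∨ Cov s t) := by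
  induction s with
  | nil =>
      intro acc _ _ h2
      refine ⟨h2, fun t => ?_⟩
      simp [Cov]
  | cons r rest ih =>
      intro acc hs h1 h2
      rw [List.pairwise_cons] at hs
      obtain ⟨hp', hmem', hcov'⟩ := mergeStep_spec acc r rest hs.1 h1 h2
      obtain ⟨hres, hcovres⟩ := ih (mergeStep acc r) hs.2 hmem' hp'
      refine ⟨by simpa using hres, ?_⟩
      intro t
      simp only [List.foldl_cons]
      rw [hcovres t, hcov' t]
      simp only [Cov, List.mem_cons]
      constructor
      · rintro ((h | h) | h)
        · exact Or.inl h
        · exact Or.inr ⟨r, Or.inl rfl, h⟩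
        · obtain ⟨x, hx, hcv⟩ := h; exact Or.inr ⟨x, Or.inr hx, hcv⟩
      · rintro (h | ⟨x, hx | hx, hcv⟩)
        · exact Or.inl (Or.inl h)
        · subst hx; exact Or.inl (Or.inr hcv)
        · exact Or.inr ⟨x, hx, hcv⟩

-- early-exit scan is exact coverage on a start-sorted list
theorem bContains_iff (l : List (Int × Int)) (t : Int)
    (hp : l.Pairwise (fun r r' => r.1 ≤ r'.1)) : bContains l t = true ↔ Cov l t := by
  induction l with
  | nil => simp [bContains, Cov]
  | cons r rest ih =>
      obtain ⟨b, e⟩ := r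
      rw [List.pairwise_cons] at hp
      by_cases h1 : t < b
      · simp only [bContains, if_pos h1, Cov, List.mem_cons]
        constructor
        · intro h; cases h
        · rintro ⟨x, hx | hx, hcv⟩
          · subst hx; exact absurd hcv.1 (by omega)
          · have := hp.1 x hx; simp only at this hcv; omega
      · by_cases h2 : t ≤ e
        · simp only [bContains, if_neg h1, if_pos h2, Cov, List.mem_cons]
          constructor
          · intro _; exact ⟨(b, e), Or.inl rfl, by omega⟩
          · intro _; trivial
        · simp only [bContains, if_neg h1, if_neg h2]
          rw [ih hp.2]
          simp only [Cov, List.mem_cons]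
          constructor
          · rintro ⟨x, hx, hcv⟩; exact ⟨x, Or.inr hx, hcv⟩
          · rintro ⟨x, hx | hx, hcv⟩
            · subst hx; simp only at hcv; omega
            · exact ⟨x, hx, hcv⟩

-- ===== VERDICT (by name: the statement is the Claim_ definition above) =====
theorem check_valid_tickets_two_spec : Claim_equal_check_valid_tickets_two := by
  intro vr nts _
  unfold Spec_check_valid_tickets_two check_valid_tickets_two
  simp only [check_valid_tickets_two_alt]
  rw [aLoop_eq_filter]
  set M := ((PySem.List.sorted vr (fun r => r.1) false).foldl mergeStep []).reverse with hM
  have hcover : ∀ t : Int, aCover vr t = bContains M t := by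
    intro t
    have hs : (PySem.List.sorted vr (fun r => r.1) false).Pairwise (fun r r' => r.1 ≤ r'.1) :=
      PySem.List.sorted_pairwise vr (fun r => r.1)
    obtain ⟨hres, hcov⟩ := merge_fold (PySem.List.sorted vr (fun r => r.1) false) []
      hs (by simp) (by simp)
    have hrev : M.Pairwise (fun r r' => r.1 ≤ r'.1) := by
      rw [hM, List.pairwise_reverse]; exact hres
    rw [Bool.eq_iff_iff, aCover_iff, bContains_iff M t hrev]
    have hMrev : Cov M t ↔ Cov ((PySem.List.sorted vr (fun r => r.1) false).foldl mergeStep []) t := by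
      rw [hM]; simp [Cov]
    rw [hMrev, hcov t]
    simp only [Cov]
    constructor
    · rintro ⟨x, hx, hcv⟩
      exact Or.inr ⟨x, (PySem.List.mem_sorted _ _ _ _).mpr hx, hcv⟩
    · rintro (h | ⟨x, hx, hcv⟩)
      · obtain ⟨x, hx, _⟩ := h; cases hx
      · exact ⟨x, (PySem.List.mem_sorted _ _ _ _).mp hx, hcv⟩
  apply List.filter_congr
  intro tk _
  rw [aTicket_eq_all]
  exact congrArg tk.all (funext hcover)
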